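-- pv_equiv track=rewrite | github.com/jkomkov/bulla | tests/test_hierarchical.py | _partition_join
-- ===== SOURCE A (Python) =====
-- def _partition_join(P, Q, names):
--     """Join (least upper bound): union-find on co-occurrence."""
--     parent = {n: n for n in names}
--
--     def find(x):
--         while parent[x] != x:
--             parent[x] = parent[parent[x]]
--             x = parent[x]
--         return x
--
--     def union(a, b):
--         a, b = find(a), find(b)
--         if a != b:
--             parent[a] = b
--
--     for part in [P, Q]:
--         for group in part:
--             members = list(group)
--             for i in range(1, len(members)):
--                 union(members[0], members[i])
--     groups: dict[str, set[str]] = {}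
--     for n in names:
--         r = find(n)
--         groups.setdefault(r, set()).add(n)
--     return [frozenset(g) for g in groups.values()]
-- ===== SOURCE B (Python) =====
-- def _partition_join(P, Q, names):
--     """Join (least upper bound): iterative label merging over co-occurrence pairs."""
--     lab = {n: n for n in names}
--     for part in [P, Q]:
--         for group in part:
--             members = list(group)
--             for m in members[1:]:
--                 la, lb = lab[members[0]], lab[m]
--                 if la != lb:
--                     for k in lab.keys():
--                         if lab[k] == la:
--                             lab[k] = lb
--     index = {}
--     out = []
--     for n in names:
--         l = lab[n]
--         if l in index:
--             out[index[l]].add(n)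
--         else:
--             index[l] = len(out)
--             out.append({n})
--     return [frozenset(s) for s in out]
-- ===== Notes on version B (the rewrite author's own statement) =====
-- stated objective: simpler
-- what changed: B replaces A's disjoint-set forest (find with path compression, union by root re-pointing) with naive iterative label merging -- every name carries a label and joining two classes rewrites one label into the other across the whole table -- and rebuilds the output grouping with an explicit position index instead of dict.setdefault.
-- outside the precondition, e.g. on _partition_join([{'x', 'a'}], [], ['a']): A raises KeyError, B raises KeyError
import Mathlib
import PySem

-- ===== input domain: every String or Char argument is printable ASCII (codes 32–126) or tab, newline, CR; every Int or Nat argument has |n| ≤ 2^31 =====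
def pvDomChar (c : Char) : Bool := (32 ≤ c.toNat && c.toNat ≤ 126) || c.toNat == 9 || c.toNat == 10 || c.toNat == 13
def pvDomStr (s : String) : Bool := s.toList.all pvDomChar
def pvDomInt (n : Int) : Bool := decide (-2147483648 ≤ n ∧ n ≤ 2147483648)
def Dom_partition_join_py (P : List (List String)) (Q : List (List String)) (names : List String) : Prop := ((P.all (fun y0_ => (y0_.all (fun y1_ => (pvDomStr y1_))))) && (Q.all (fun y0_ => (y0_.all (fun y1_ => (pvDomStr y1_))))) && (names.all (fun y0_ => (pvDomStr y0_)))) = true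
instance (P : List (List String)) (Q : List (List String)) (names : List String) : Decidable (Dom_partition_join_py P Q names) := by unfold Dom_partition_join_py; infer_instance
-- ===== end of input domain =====

-- B replaces A's union-find (find with path compression + union) by naive iterative
-- label merging: every element carries a label, and joining two classes rewrites one
-- label into the other across the whole table; the output grouping is rebuilt with an
-- explicit position index instead of dict.setdefault.  Objective: simpler (no trees,
-- no find/union, no compression); not faster.

-- ===== PORT A =====
-- find(x): chase parent pointers with path compression.  The Nat fuel only makes
-- Python's `while` loop structurally recursive; on Pre_-inputs names.length + 1 is
-- proved sufficient (parent chains are acyclic and stay inside the keys of parent).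
-- Python's parent[x] on a missing key is a KeyError: the `none` branch is excluded by Pre_.
def ufFind : Nat → PySem.Dict String String → String → PySem.Dict String String × String
  | 0, p, x => (p, x)
  | fuel+1, p, x =>
    match p.get? x with
    | none => (p, x)
    | some px =>
      if px = x then (p, x)
      else ufFind fuel (p.insert x ((p.get? px).getD px)) ((p.get? px).getD px)

def ufUnion (fuel : Nat) (p : PySem.Dict String String) (a b : String) :
    PySem.Dict String String :=
  let fa := ufFind fuel p a
  let fb := ufFind fuel fa.1 b
  if fa.2 ≠ fb.2 then fb.1.insert fa.2 fb.2 else fb.1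

def partition_join_py (P : List (List String)) (Q : List (List String)) (names : List String) : List (List String) :=
  let fuel := names.length + 1
  let parent0 : PySem.Dict String String := names.foldl (fun d n => d.insert n n) PySem.Dict.empty
  let parent1 := [P, Q].foldl (fun par part =>
      part.foldl (fun par group =>
        (PySem.List.pyRange 1 (group.length : Int) 1).foldl (fun par i =>
          ufUnion fuel par (PySem.List.pyGetD group 0 "") (PySem.List.pyGetD group i "")) par) par)
    parent0
  let st := names.foldl (fun (st : PySem.Dict String String × PySem.Dict String (PySem.Set String)) n =>
      let fr := ufFind fuel st.1 n
      (fr.1, st.2.insert fr.2 ((st.2.getD fr.2 PySem.Set.empty).add n))) (parent1, PySem.Dict.empty)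
  st.2.values

-- ===== PORT B =====
-- for k in lab.keys(): if lab[k] == la: lab[k] = lb   (keys never change, so the fold
-- runs over the key list of the dict the loop started with; lab[k] reads the current dict)
def relabelStep (lab : PySem.Dict String String) (la lb : String) : PySem.Dict String String :=
  lab.keys.foldl (fun d k => if d.getD k "" = la then d.insert k lb else d) lab

-- Python's lab[...] on a missing key is a KeyError: the getD defaults are excluded by Pre_.
def partition_join_py_alt (P : List (List String)) (Q : List (List String)) (names : List String) : List (List String) :=
  let lab0 : PySem.Dict String String := names.foldl (fun d n => d.insert n n) PySem.Dict.empty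
  let lab := [P, Q].foldl (fun lab part =>
      part.foldl (fun lab group =>
        (PySem.List.slice group (some 1) none).foldl (fun lab m =>
          let la := lab.getD (PySem.List.pyGetD group 0 "") ""
          let lb := lab.getD m ""
          if la ≠ lb then relabelStep lab la lb else lab) lab) lab) lab0
  let st := names.foldl (fun (st : PySem.Dict String Nat × List (PySem.Set String)) n =>
      let l := lab.getD n ""
      match st.1.get? l with
      | some i => (st.1, st.2.set i ((st.2.getD i PySem.Set.empty).add n))
      | none => (st.1.insert l st.2.length, st.2 ++ [PySem.Set.ofList [n]]))
    (PySem.Dict.empty, ([] : List (PySem.Set String)))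
  st.2

-- ===== PRECONDITION & SPEC =====
-- Pre_ excludes exactly the inputs on which the Python A raises KeyError: a group of
-- size ≥ 2 containing an element that is not in names (A calls union on all its members).
def Pre_partition_join_py (P : List (List String)) (Q : List (List String)) (names : List String) : Prop :=
  ∀ g ∈ P ++ Q, 2 ≤ g.length → ∀ m ∈ g, m ∈ names
instance (P : List (List String)) (Q : List (List String)) (names : List String) : Decidable (Pre_partition_join_py P Q names) := by unfold Pre_partition_join_py; infer_instance

def pvWitness_partition_join_py : List (List String) × List (List String) × List String :=
  ([["a", "b"]], [["b", "c"]], ["a", "b", "c", "d"])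

def Spec_partition_join_py (P : List (List String)) (Q : List (List String)) (names : List String) (out : List (List String)) : Prop := out = partition_join_py_alt P Q names
instance (P : List (List String)) (Q : List (List String)) (names : List String) (out : List (List String)) : Decidable (Spec_partition_join_py P Q names out) := by unfold Spec_partition_join_py; infer_instance

-- ===== CLAIM (what is proved, stated in full; the proofs are below) =====
def Claim_equal_partition_join_py : Prop := ∀ (P : List (List String)) (Q : List (List String)) (names : List String), Dom_partition_join_py P Q names → Pre_partition_join_py P Q names → Spec_partition_join_py P Q names (partition_join_py P Q names)

-- ===== LEMMAS AND PROOFS =====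

def StepP (p : PySem.Dict String String) (x y : String) : Prop :=
  p.get? x = some y ∧ y ≠ x

def IsRoot (p : PySem.Dict String String) (r : String) : Prop :=
  p.get? r = some r

def RootsTo (p : PySem.Dict String String) (x r : String) : Prop :=
  Relation.ReflTransGen (StepP p) x r ∧ IsRoot p r

def UFInv (N : List String) (p : PySem.Dict String String) : Prop :=
  (∀ z, (p.get? z).isSome ↔ z ∈ N) ∧
  (∀ z y, p.get? z = some y → y ∈ N) ∧
  (∃ h : String → Nat, ∀ x y, StepP p x y → h y < h x)

def reachS (N : List String) (p : PySem.Dict String String) (x : String) : Set String :=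
  {y | y ∈ N ∧ Relation.ReflTransGen (StepP p) x y}

noncomputable def reachCard (N : List String) (p : PySem.Dict String String) (x : String) : Nat :=
  (reachS N p x).ncard

theorem measure_le_of_reach {p : PySem.Dict String String} {h : String → Nat}
    (hm : ∀ x y, StepP p x y → h y < h x) {a b : String}
    (hr : Relation.ReflTransGen (StepP p) a b) : h b ≤ h a := by
  induction hr with
  | refl => exact le_rfl
  | tail _ hstep ih => exact le_trans (le_of_lt (hm _ _ hstep)) ih

theorem reach_from_root {p : PySem.Dict String String} {r y : String}
    (hr : IsRoot p r) (hp : Relation.ReflTransGen (StepP p) r y) : y = r := by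
  induction hp with
  | refl => rfl
  | tail _ hstep ih =>
    subst ih
    obtain ⟨hg, hne⟩ := hstep
    rw [hr] at hg
    exact absurd (Option.some.inj hg) hne.symm

theorem rootsTo_unique {p : PySem.Dict String String} {x r r' : String}
    (h1 : RootsTo p x r) (h2 : RootsTo p x r') : r = r' := by
  obtain ⟨hp1, hr1⟩ := h1
  obtain ⟨hp2, hr2⟩ := h2
  revert hp2
  induction hp1 using Relation.ReflTransGen.head_induction_on with
  | refl => intro hp2; exact (reach_from_root hr1 hp2).symm
  | head hstep _ ih =>
    intro hp2
    rcases hp2.cases_head with rfl | ⟨v, hstep', htail⟩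
    · obtain ⟨hg, hne⟩ := hstep
      rw [hr2] at hg
      exact absurd (Option.some.inj hg).symm hne
    · obtain ⟨hg, _⟩ := hstep
      obtain ⟨hg', _⟩ := hstep'
      rw [hg] at hg'
      cases Option.some.inj hg'
      exact ih htail

theorem root_mem {N : List String} {p : PySem.Dict String String}
    (hInv : UFInv N p) {x r : String} (h : RootsTo p x r) : r ∈ N := by
  exact hInv.2.1 r r h.2

theorem reachS_finite (N : List String) (p : PySem.Dict String String) (x : String) :
    (reachS N p x).Finite := by
  exact Set.Finite.subset N.toFinset.finite_toSet (fun y hy => by simpa using hy.1)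

theorem reachCard_le {N : List String} (p : PySem.Dict String String) (x : String) :
    reachCard N p x ≤ N.length := by
  have hsub : reachS N p x ⊆ ↑N.toFinset := fun y hy => by simpa using hy.1
  calc reachCard N p x ≤ (↑N.toFinset : Set String).ncard :=
        Set.ncard_le_ncard hsub N.toFinset.finite_toSet
    _ = N.toFinset.card := Set.ncard_coe_finset _
    _ ≤ N.length := N.toFinset_card_le

theorem reachCard_pos {N : List String} {p : PySem.Dict String String} {x : String}
    (hx : x ∈ N) : 1 ≤ reachCard N p x := by
  have : 0 < reachCard N p x := by
    rw [reachCard, Set.ncard_pos (reachS_finite N p x)]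
    exact ⟨x, hx, Relation.ReflTransGen.refl⟩
  omega

theorem ufFind_spec {N : List String} :
    ∀ (fuel : Nat) (p : PySem.Dict String String) (x : String), UFInv N p → x ∈ N →
    reachCard N p x ≤ fuel →
    UFInv N (ufFind fuel p x).1 ∧
    RootsTo p x (ufFind fuel p x).2 ∧
    (∀ z r, RootsTo p z r ↔ RootsTo (ufFind fuel p x).1 z r) := by
  intro fuel
  induction fuel with
  | zero =>
    intro p x hInv hx hfuel
    exact absurd hfuel (by have := reachCard_pos (p := p) hx; omega)
  | succ fuel ih =>
    intro p x hInv hx hfuel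
    obtain ⟨hkeys, hclosed, hmeas⟩ := hInv
    obtain ⟨px, hpx⟩ := Option.isSome_iff_exists.mp ((hkeys x).mpr hx)
    by_cases hpxx : px = x
    · -- root found: returns (p, x)
      have hres : ufFind (fuel+1) p x = (p, x) := by
        simp [ufFind, hpx, hpxx]
      rw [hres]
      subst hpxx
      refine ⟨⟨hkeys, hclosed, hmeas⟩, ⟨Relation.ReflTransGen.refl, hpx⟩, fun z r => Iff.rfl⟩
    · -- compression step
      have hpxN : px ∈ N := hclosed x px hpx
      obtain ⟨ppx, hppx⟩ := Option.isSome_iff_exists.mp ((hkeys px).mpr hpxN)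
      have hgetD : (p.get? px).getD px = ppx := by rw [hppx]; rfl
      have hres : ufFind (fuel+1) p x = ufFind fuel (p.insert x ppx) ppx := by
        simp only [ufFind, hpx, if_neg hpxx, hgetD]
      set p' := p.insert x ppx with hp'
      have hget' : ∀ z, p'.get? z = if z = x then some ppx else p.get? z := by
        intro z; exact PySem.Dict.get?_insert p x z ppx
      obtain ⟨h, hm⟩ := hmeas
      have hppxN : ppx ∈ N := hclosed px ppx hppx
      have hlt1 : h px < h x := hm x px ⟨hpx, hpxx⟩
      have hltppx : h ppx < h x := by
        by_cases hpq : ppx = px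
        · rw [hpq]; exact hlt1
        · exact lt_trans (hm px ppx ⟨hppx, hpq⟩) hlt1
      have hppxx : ppx ≠ x := fun e => by rw [e] at hltppx; omega
      have hm' : ∀ u v, StepP p' u v → h v < h u := by
        intro u v ⟨hg, hne⟩
        rw [hget' u] at hg
        by_cases hux : u = x
        · rw [if_pos hux] at hg; cases Option.some.inj hg; rw [hux]; exact hltppx
        · rw [if_neg hux] at hg; exact hm u v ⟨hg, hne⟩
      have hkeys' : ∀ z, (p'.get? z).isSome ↔ z ∈ N := by
        intro z; rw [hget' z]
        by_cases hzx : z = x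
        · rw [if_pos hzx, hzx]; simpa using hx
        · rw [if_neg hzx]; exact hkeys z
      have hclosed' : ∀ z y, p'.get? z = some y → y ∈ N := by
        intro z y hg; rw [hget' z] at hg
        by_cases hzx : z = x
        · rw [if_pos hzx] at hg; cases Option.some.inj hg; exact hppxN
        · rw [if_neg hzx] at hg; exact hclosed z y hg
      have hInv' : UFInv N p' := ⟨hkeys', hclosed', h, hm'⟩
      -- roots coincide
      have hroot_iff : ∀ r, IsRoot p' r ↔ IsRoot p r := by
        intro r
        by_cases hrx : r = x
        · subst hrx
          constructor
          · intro hr; rw [IsRoot, hget' r, if_pos rfl] at hr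
            exact absurd (Option.some.inj hr) hppxx
          · intro hr; rw [IsRoot, hpx] at hr
            exact absurd (Option.some.inj hr) hpxx
        · rw [IsRoot, IsRoot, hget' r, if_neg hrx]
      -- x reaches ppx in p
      have hx_to_ppx : Relation.ReflTransGen (StepP p) x ppx := by
        by_cases hpq : ppx = px
        · rw [hpq]; exact Relation.ReflTransGen.single ⟨hpx, hpxx⟩
        · exact Relation.ReflTransGen.head ⟨hpx, hpxx⟩
            (Relation.ReflTransGen.single ⟨hppx, hpq⟩)
      -- transfer p-paths-to-root into p'
      have T1 : ∀ n u r, h u ≤ n → RootsTo p u r → Relation.ReflTransGen (StepP p') u r := by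
        intro n
        induction n with
        | zero =>
          intro u r hu ⟨hpath, hroot⟩
          rcases hpath.cases_head with rfl | ⟨v, hstep, _⟩
          · exact Relation.ReflTransGen.refl
          · exact absurd (hm u v hstep) (by omega)
        | succ m ihm =>
          intro u r hu ⟨hpath, hroot⟩
          rcases hpath.cases_head with rfl | ⟨v, hstep, htail⟩
          · exact Relation.ReflTransGen.refl
          · have hltv := hm u v hstep
            by_cases hux : u = x
            · have hvpx : v = px := by
                obtain ⟨hg, _⟩ := hstep; rw [hux, hpx] at hg; exact (Option.some.inj hg).symm
              rw [hvpx] at htail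
              -- from px the root is r; ppx also roots to r
              have hppx_to_r : RootsTo p ppx r := by
                by_cases hpq : ppx = px
                · rw [hpq]; exact ⟨htail, hroot⟩
                · rcases htail.cases_head with heq | ⟨w, hstep', htail'⟩
                  · -- px is the root: then p.get? px = some px, but = some ppx
                    rw [← heq, IsRoot, hppx] at hroot
                    exact absurd (Option.some.inj hroot) hpq
                  · have hwppx : w = ppx := by
                      obtain ⟨hg, _⟩ := hstep'; rw [hppx] at hg; exact (Option.some.inj hg).symm
                    rw [hwppx] at htail'
                    exact ⟨htail', hroot⟩
              have hux' : h u = h x := by rw [hux]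
              have hrec := ihm ppx r (by omega) hppx_to_r
              refine Relation.ReflTransGen.head ⟨?_, ?_⟩ hrec
              · rw [hget' u, if_pos hux]
              · rw [hux]; exact hppxx
            · have hstep' : StepP p' u v := by
                obtain ⟨hg, hne⟩ := hstep
                exact ⟨by rw [hget' u, if_neg hux]; exact hg, hne⟩
              exact Relation.ReflTransGen.head hstep' (ihm v r (by omega) ⟨htail, hroot⟩)
      -- transfer p'-paths into p (to any target)
      have T2 : ∀ u y, Relation.ReflTransGen (StepP p') u y → Relation.ReflTransGen (StepP p) u y := by
        intro u y hpath
        induction hpath using Relation.ReflTransGen.head_induction_on with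
        | refl => exact Relation.ReflTransGen.refl
        | @head a b hstep _ ihh =>
          by_cases hax : a = x
          · have hbppx : b = ppx := by
              obtain ⟨hg, _⟩ := hstep; rw [hax, hget' x, if_pos rfl] at hg
              exact (Option.some.inj hg).symm
            rw [hbppx] at ihh
            rw [hax]
            exact Relation.ReflTransGen.trans hx_to_ppx ihh
          · obtain ⟨hg, hne⟩ := hstep
            rw [hget' a, if_neg hax] at hg
            exact Relation.ReflTransGen.head ⟨hg, hne⟩ ihh
      have hRT : ∀ z r, RootsTo p z r ↔ RootsTo p' z r := by
        intro z r
        constructor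
        · intro hzr; exact ⟨T1 (h z) z r le_rfl hzr, (hroot_iff r).mpr hzr.2⟩
        · intro hzr; exact ⟨T2 z r hzr.1, (hroot_iff r).mp hzr.2⟩
      -- fuel accounting
      have hU : ∀ u y, Relation.ReflTransGen (StepP p') u y → h u < h x →
          Relation.ReflTransGen (StepP p) u y := by
        intro u y hpath
        induction hpath using Relation.ReflTransGen.head_induction_on with
        | refl => intro _; exact Relation.ReflTransGen.refl
        | @head a b hstep _ ihh =>
          intro ha
          have hax : a ≠ x := fun e => by rw [e] at ha; omega
          obtain ⟨hg, hne⟩ := hstep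
          rw [hget' a, if_neg hax] at hg
          have hba : h b < h a := hm a b ⟨hg, hne⟩
          exact Relation.ReflTransGen.head ⟨hg, hne⟩ (ihh (by omega))
      have hsub1 : reachS N p' ppx ⊆ reachS N p ppx := by
        intro y ⟨hyN, hy⟩; exact ⟨hyN, hU ppx y hy hltppx⟩
      have hsub2 : reachS N p ppx ⊆ reachS N p x := by
        intro y ⟨hyN, hy⟩; exact ⟨hyN, Relation.ReflTransGen.trans hx_to_ppx hy⟩
      have hxnot : x ∉ reachS N p ppx := by
        intro ⟨_, hy⟩
        exact absurd (measure_le_of_reach hm hy) (by omega)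
      have hss : reachS N p ppx ⊂ reachS N p x :=
        ⟨hsub2, fun hsup => hxnot (hsup ⟨hx, Relation.ReflTransGen.refl⟩)⟩
      have hcard : reachCard N p' ppx < reachCard N p x := by
        calc reachCard N p' ppx ≤ reachCard N p ppx :=
              Set.ncard_le_ncard hsub1 (reachS_finite N p ppx)
          _ < reachCard N p x := Set.ncard_lt_ncard hss (reachS_finite N p x)
      have hfuel' : reachCard N p' ppx ≤ fuel := by omega
      obtain ⟨ih1, ih2, ih3⟩ := ih p' ppx hInv' hppxN hfuel'
      rw [hres]
      refine ⟨ih1, ?_, fun z r => (hRT z r).trans (ih3 z r)⟩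
      -- RootsTo p x (result root)
      have hppx_root : RootsTo p' ppx (ufFind fuel p' ppx).2 := ih2
      have hpp : RootsTo p ppx (ufFind fuel p' ppx).2 := (hRT ppx _).mpr hppx_root
      exact ⟨Relation.ReflTransGen.trans hx_to_ppx hpp.1, hpp.2⟩

theorem ufFind_spec' {N : List String} {p : PySem.Dict String String} {x : String}
    (hInv : UFInv N p) (hx : x ∈ N) :
    UFInv N (ufFind (N.length + 1) p x).1 ∧
    RootsTo p x (ufFind (N.length + 1) p x).2 ∧
    (∀ z r, RootsTo p z r ↔ RootsTo (ufFind (N.length + 1) p x).1 z r) :=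
  ufFind_spec (N.length + 1) p x hInv hx (by have := reachCard_le (N := N) p x; omega)

def Lstep (L : String → String) (e : String × String) : String → String :=
  fun z => if L z = L e.1 then L e.2 else L z

def UFState (N : List String) (p : PySem.Dict String String) (L : String → String) : Prop :=
  UFInv N p ∧ ∀ z ∈ N, RootsTo p z (L z)

-- linking a root: paths of p lift to p.insert ra rb when ra is a root of p
theorem lift_path {p : PySem.Dict String String} {ra rb : String} (hra : IsRoot p ra) :
    ∀ {u r : String}, Relation.ReflTransGen (StepP p) u r →
      Relation.ReflTransGen (StepP (p.insert ra rb)) u r := by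
  intro u r hpath
  induction hpath using Relation.ReflTransGen.head_induction_on with
  | refl => exact Relation.ReflTransGen.refl
  | @head c d hstep _ ihh =>
    obtain ⟨hg, hne⟩ := hstep
    have hcra : c ≠ ra := by
      intro e; rw [e, hra] at hg
      exact hne ((Option.some.inj hg).symm.trans e.symm)
    refine Relation.ReflTransGen.head ⟨?_, hne⟩ ihh
    rw [PySem.Dict.get?_insert p ra c rb, if_neg hcra]; exact hg

theorem ufUnion_state {N : List String} {p : PySem.Dict String String} {L : String → String}
    {a b : String} (hS : UFState N p L) (ha : a ∈ N) (hb : b ∈ N) :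
    UFState N (ufUnion (N.length + 1) p a b) (Lstep L (a, b)) := by
  obtain ⟨hInv, hroots⟩ := hS
  obtain ⟨hI1, hR1, hT1⟩ := ufFind_spec' hInv ha
  set p1 := (ufFind (N.length + 1) p a).1 with hp1
  set ra := (ufFind (N.length + 1) p a).2 with hra
  have hraL : ra = L a := rootsTo_unique hR1 (hroots a ha)
  have hroots1 : ∀ z ∈ N, RootsTo p1 z (L z) := fun z hz => (hT1 z (L z)).mp (hroots z hz)
  obtain ⟨hI2, hR2, hT2⟩ := ufFind_spec' hI1 hb
  set p2 := (ufFind (N.length + 1) p1 b).1 with hp2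
  set rb := (ufFind (N.length + 1) p1 b).2 with hrb
  have hrbL : rb = L b := rootsTo_unique hR2 (hroots1 b hb)
  have hroots2 : ∀ z ∈ N, RootsTo p2 z (L z) := fun z hz => (hT2 z (L z)).mp (hroots1 z hz)
  have hres : ufUnion (N.length + 1) p a b = if ra ≠ rb then p2.insert ra rb else p2 := rfl
  rw [hres]
  by_cases hne : ra = rb
  · rw [if_neg (by simpa using hne)]
    refine ⟨hI2, fun z hz => ?_⟩
    have := hroots2 z hz
    by_cases hc : L z = L a
    · simpa [Lstep, hc, ← hraL, ← hrbL, hne] using this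
    · simpa [Lstep, hc] using this
  · rw [if_pos hne]
    set p3 := p2.insert ra rb with hp3
    have hget3 : ∀ z, p3.get? z = if z = ra then some rb else p2.get? z :=
      fun z => PySem.Dict.get?_insert p2 ra z rb
    have hraN : ra ∈ N := root_mem hInv hR1
    have hrbN : rb ∈ N := root_mem hI1 hR2
    have hra_root : IsRoot p2 ra := ((hT2 a ra).mp ((hT1 a ra).mp hR1)).2
    have hrb_root : IsRoot p2 rb := ((hT2 b rb).mp hR2).2
    obtain ⟨hkeys2, hclosed2, h, hm⟩ := hI2
    -- C z: z is in rb's class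
    have hCstep : ∀ u v, StepP p2 u v →
        (Relation.ReflTransGen (StepP p2) u rb ↔ Relation.ReflTransGen (StepP p2) v rb) := by
      intro u v hstep
      constructor
      · intro hp
        rcases hp.cases_head with heq | ⟨w, hstep', htail⟩
        · exfalso
          rw [← heq] at hrb_root
          obtain ⟨hg, hne'⟩ := hstep
          rw [hrb_root] at hg
          exact hne' (Option.some.inj hg).symm
        · obtain ⟨hg, _⟩ := hstep
          obtain ⟨hg', _⟩ := hstep'
          rw [hg] at hg'
          cases Option.some.inj hg'
          exact htail
      · intro hp; exact Relation.ReflTransGen.head hstep hp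
    have hm3 : ∀ u v, StepP p3 u v →
        (fun z => h z + @ite _ (Relation.ReflTransGen (StepP p2) z rb) (Classical.propDecidable _) 0 (h rb + 1)) v <
        (fun z => h z + @ite _ (Relation.ReflTransGen (StepP p2) z rb) (Classical.propDecidable _) 0 (h rb + 1)) u := by
      intro u v hstep
      beta_reduce
      obtain ⟨hg, hne'⟩ := hstep
      rw [hget3 u] at hg
      by_cases hura : u = ra
      · rw [if_pos hura] at hg
        cases Option.some.inj hg
        have hCra : ¬ Relation.ReflTransGen (StepP p2) ra rb := by
          intro hp; exact hne (reach_from_root hra_root hp).symm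
        have hCrb : Relation.ReflTransGen (StepP p2) rb rb := Relation.ReflTransGen.refl
        have hCu : ¬ Relation.ReflTransGen (StepP p2) u rb := by rw [hura]; exact hCra
        have hhu : h u = h ra := by rw [hura]
        rw [if_pos hCrb, if_neg hCu, hhu]
        omega
      · rw [if_neg hura] at hg
        have hstep2 : StepP p2 u v := ⟨hg, hne'⟩
        have hlt := hm u v hstep2
        have hiff := hCstep u v hstep2
        by_cases hC : Relation.ReflTransGen (StepP p2) u rb
        · rw [if_pos hC, if_pos (hiff.mp hC)]; omega
        · rw [if_neg hC, if_neg (fun hv => hC (hiff.mpr hv))]; omega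
    have hI3 : UFInv N p3 := by
      refine ⟨fun z => ?_, fun z y hg => ?_, _, hm3⟩
      · rw [hget3 z]
        by_cases hzra : z = ra
        · rw [if_pos hzra, hzra]; simpa using hraN
        · rw [if_neg hzra]; exact hkeys2 z
      · rw [hget3 z] at hg
        by_cases hzra : z = ra
        · rw [if_pos hzra] at hg; cases Option.some.inj hg; exact hrbN
        · rw [if_neg hzra] at hg; exact hclosed2 z y hg
    refine ⟨hI3, fun z hz => ?_⟩
    have hz2 := hroots2 z hz
    by_cases hc : L z = L a
    · -- z's class is merged into rb's
      have hzra : Relation.ReflTransGen (StepP p2) z ra := by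
        have := hz2.1; rw [hc, ← hraL] at this; exact this
      have hlift := lift_path (rb := rb) hra_root hzra
      have hstep3 : StepP p3 ra rb := by
        refine ⟨by rw [hget3 ra, if_pos rfl], fun e => hne e.symm⟩
      have hpath3 : Relation.ReflTransGen (StepP p3) z rb :=
        Relation.ReflTransGen.tail hlift hstep3
      have hroot3 : IsRoot p3 rb := by
        rw [IsRoot, hget3 rb, if_neg (fun e => hne e.symm)]; exact hrb_root
      simp only [Lstep, hc]
      exact ⟨by rw [← hrbL]; exact hpath3, by rw [← hrbL]; exact hroot3⟩
    · have hlift := lift_path (rb := rb) hra_root hz2.1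
      have hLzra : L z ≠ ra := by rw [hraL]; exact hc
      have hroot3 : IsRoot p3 (L z) := by
        rw [IsRoot, hget3 (L z), if_neg hLzra]; exact hz2.2
      simp only [Lstep]
      rw [if_neg hc]
      exact ⟨hlift, hroot3⟩

def edgesOf (gs : List (List String)) : List (String × String) :=
  gs.flatMap (fun g => (g.drop 1).map (fun m => (g.getD 0 "", m)))

theorem foldl_insert_get? (names : List String) (d0 : PySem.Dict String String) (z : String) :
    (names.foldl (fun d n => d.insert n n) d0).get? z =
      if z ∈ names then some z else d0.get? z := by
  induction names generalizing d0 with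
  | nil => simp
  | cons n ns ih =>
    simp only [List.foldl_cons, ih (d0.insert n n), List.mem_cons]
    by_cases hz : z ∈ ns
    · rw [if_pos hz, if_pos (Or.inr hz)]
    · rw [if_neg hz, PySem.Dict.get?_insert d0 n z n]
      by_cases hzn : z = n
      · rw [if_pos hzn, if_pos (Or.inl hzn), hzn]
      · rw [if_neg hzn, if_neg (by tauto)]

theorem foldl_insert_nodup (names : List String) (d0 : PySem.Dict String String)
    (h : d0.keys.Nodup) : (names.foldl (fun d n => d.insert n n) d0).keys.Nodup := by
  induction names generalizing d0 with
  | nil => simpa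
  | cons n ns ih => exact ih _ (PySem.Dict.nodup_keys_insert d0 n n h)

theorem ufProcess_state {N : List String} {L : String → String} (es : List (String × String))
    {p : PySem.Dict String String} (hS : UFState N p L)
    (he : ∀ e ∈ es, e.1 ∈ N ∧ e.2 ∈ N) :
    UFState N (es.foldl (fun p e => ufUnion (N.length + 1) p e.1 e.2) p)
      (es.foldl Lstep L) := by
  induction es generalizing p L with
  | nil => exact hS
  | cons e es ih =>
    simp only [List.foldl_cons]
    have he0 := he e List.mem_cons_self
    exact ih (by simpa using ufUnion_state hS he0.1 he0.2)
      (fun e' he' => he e' (List.mem_cons_of_mem e he'))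

def LabState (N : List String) (lab : PySem.Dict String String) (L : String → String) : Prop :=
  (∀ z, lab.get? z = if z ∈ N then some (L z) else none) ∧ lab.keys.Nodup

theorem relabel_fold {N : List String} (ks : List String) (hnd : ks.Nodup)
    (hks : ∀ k ∈ ks, k ∈ N) (d : PySem.Dict String String) (M : String → String)
    (hd : ∀ z, d.get? z = if z ∈ N then some (M z) else none) (la lb : String) :
    ∀ z, (ks.foldl (fun d k => if d.getD k "" = la then d.insert k lb else d) d).get? z =
      if z ∈ N then some (if z ∈ ks ∧ M z = la then lb else M z) else none := by
  induction ks generalizing d M with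
  | nil => intro z; simpa using hd z
  | cons k ks ih =>
    intro z
    have hkN : k ∈ N := hks k List.mem_cons_self
    have hknks : k ∉ ks := (List.nodup_cons.mp hnd).1
    have hgetDk : d.getD k "" = M k := by
      rw [PySem.Dict.getD_eq_get?_getD, hd k, if_pos hkN]; rfl
    set d1 := if d.getD k "" = la then d.insert k lb else d with hd1
    have hd1get : ∀ z, d1.get? z = if z ∈ N then some (if z = k ∧ M z = la then lb else M z) else none := by
      intro w
      rw [hd1, hgetDk]
      by_cases hMk : M k = la
      · rw [if_pos hMk, PySem.Dict.get?_insert d k w lb, hd w]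
        by_cases hwk : w = k
        · rw [if_pos hwk, if_pos (by rw [hwk]; exact hkN), hwk,
            if_pos ⟨rfl, hMk⟩]
        · rw [if_neg hwk]
          by_cases hwN : w ∈ N
          · rw [if_pos hwN, if_pos hwN, if_neg (by tauto)]
          · rw [if_neg hwN, if_neg hwN]
      · rw [if_neg hMk, hd w]
        by_cases hwN : w ∈ N
        · rw [if_pos hwN, if_pos hwN]
          congr 1
          by_cases hwk : w = k
          · rw [if_neg (by rw [hwk]; tauto), hwk]
          · rw [if_neg (by tauto)]
        · rw [if_neg hwN, if_neg hwN]
    have := ih (List.nodup_cons.mp hnd).2 (fun k' hk' => hks k' (List.mem_cons_of_mem k hk'))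
      d1 _ hd1get z
    simp only [List.foldl_cons]
    rw [this]
    by_cases hzN : z ∈ N
    · rw [if_pos hzN, if_pos hzN]
      congr 1
      by_cases hzk : z = k
      · subst hzk
        by_cases hMz : M z = la <;> simp [hknks, hMz]
      · have hM1 : (if z = k ∧ M z = la then lb else M z) = M z := by simp [hzk]
        rw [hM1]
        simp [List.mem_cons, hzk]
    · rw [if_neg hzN, if_neg hzN]

theorem relabel_nodup (ks : List String) (d : PySem.Dict String String) (la lb : String)
    (h : d.keys.Nodup) :
    (ks.foldl (fun d k => if d.getD k "" = la then d.insert k lb else d) d).keys.Nodup := by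
  induction ks generalizing d with
  | nil => simpa
  | cons k ks ih =>
    simp only [List.foldl_cons]
    apply ih
    by_cases hc : d.getD k "" = la
    · rw [if_pos hc]; exact PySem.Dict.nodup_keys_insert d k lb h
    · rw [if_neg hc]; exact h

theorem labStep_state {N : List String} {lab : PySem.Dict String String} {L : String → String}
    {a b : String} (hS : LabState N lab L) (ha : a ∈ N) (hb : b ∈ N) :
    LabState N
      (if lab.getD a "" ≠ lab.getD b "" then relabelStep lab (lab.getD a "") (lab.getD b "") else lab)
      (Lstep L (a, b)) := by
  obtain ⟨hd, hnd⟩ := hS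
  have hga : lab.getD a "" = L a := by rw [PySem.Dict.getD_eq_get?_getD, hd a, if_pos ha]; rfl
  have hgb : lab.getD b "" = L b := by rw [PySem.Dict.getD_eq_get?_getD, hd b, if_pos hb]; rfl
  have hmemkeys : ∀ z, z ∈ lab.keys ↔ z ∈ N := by
    intro z
    rw [← PySem.Dict.contains_iff_mem_keys]
    constructor
    · intro hc
      by_contra hzN
      have := hd z
      rw [if_neg hzN, PySem.Dict.get?_eq_none_iff_contains] at this
      rw [this] at hc; exact Bool.false_ne_true hc
    · intro hzN
      by_contra hc
      have hcf : lab.contains z = false := by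
        cases hcc : lab.contains z
        · rfl
        · exact absurd hcc hc
      rw [← PySem.Dict.get?_eq_none_iff_contains, hd z, if_pos hzN] at hcf
      exact Option.some_ne_none _ hcf
  by_cases hne : L a = L b
  · rw [if_neg (by rw [hga, hgb]; simpa using hne)]
    refine ⟨fun z => ?_, hnd⟩
    rw [hd z]
    by_cases hzN : z ∈ N
    · rw [if_pos hzN, if_pos hzN]
      congr 1
      simp only [Lstep]
      by_cases hc : L z = L a
      · rw [if_pos hc, ← hne, hc]
      · rw [if_neg hc]
    · rw [if_neg hzN, if_neg hzN]
  · rw [if_pos (by rw [hga, hgb]; simpa using hne)]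
    refine ⟨fun z => ?_, relabel_nodup _ _ _ _ hnd⟩
    rw [relabelStep, relabel_fold lab.keys hnd (fun k hk => (hmemkeys k).mp hk) lab L hd
      (lab.getD a "") (lab.getD b "") z]
    by_cases hzN : z ∈ N
    · rw [if_pos hzN, if_pos hzN]
      congr 1
      simp only [Lstep, hga, hgb]
      by_cases hc : L z = L a
      · rw [if_pos ⟨(hmemkeys z).mpr hzN, hc⟩, if_pos hc]
      · rw [if_neg (by tauto), if_neg hc]
    · rw [if_neg hzN, if_neg hzN]

theorem labProcess_state {N : List String} {L : String → String} (es : List (String × String))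
    {lab : PySem.Dict String String} (hS : LabState N lab L)
    (he : ∀ e ∈ es, e.1 ∈ N ∧ e.2 ∈ N) :
    LabState N
      (es.foldl (fun lab e =>
        if lab.getD e.1 "" ≠ lab.getD e.2 "" then relabelStep lab (lab.getD e.1 "") (lab.getD e.2 "") else lab) lab)
      (es.foldl Lstep L) := by
  induction es generalizing lab L with
  | nil => exact hS
  | cons e es ih =>
    simp only [List.foldl_cons]
    have he0 := he e List.mem_cons_self
    exact ih (labStep_state hS he0.1 he0.2) (fun e' he' => he e' (List.mem_cons_of_mem e he'))

-- ---- edge-list flattening ----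
theorem foldl_edges_group {α : Type} (g : List String) (step : α → String × String → α) (init : α) :
    (PySem.List.pyRange 1 (g.length : Int) 1).foldl
        (fun acc i => step acc (PySem.List.pyGetD g 0 "", PySem.List.pyGetD g i "")) init =
      ((g.drop 1).map (fun m => (g.getD 0 "", m))).foldl step init := by
  rw [PySem.List.foldl_pyRange_pyGetD' g "" (fun acc m => step acc (PySem.List.pyGetD g 0 "", m)) init (by omega)]
  rw [List.foldl_map]
  rw [PySem.List.pyGetD_zero]
  rfl

theorem foldl_edges_groupB {α : Type} (g : List String) (step : α → String × String → α) (init : α) :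
    (PySem.List.slice g (some 1) none).foldl
        (fun acc m => step acc (PySem.List.pyGetD g 0 "", m)) init =
      ((g.drop 1).map (fun m => (g.getD 0 "", m))).foldl step init := by
  rw [PySem.List.slice_from_one, List.foldl_map, PySem.List.pyGetD_zero, ← List.drop_one]

theorem foldl_edges_parts {α : Type} (gs : List (List String)) (step : α → String × String → α) (init : α) :
    gs.foldl (fun acc g => ((g.drop 1).map (fun m => (g.getD 0 "", m))).foldl step acc) init =
      (edgesOf gs).foldl step init := by
  induction gs generalizing init with
  | nil => rfl
  | cons g gs ih =>
    simp only [List.foldl_cons, edgesOf, List.flatMap_cons, List.foldl_append]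
    exact ih _

-- ---- the grouping tails ----
def groupA (L : String → String) (ns : List String) (g : PySem.Dict String (PySem.Set String)) :
    PySem.Dict String (PySem.Set String) :=
  ns.foldl (fun g n => g.insert (L n) ((g.getD (L n) PySem.Set.empty).add n)) g

theorem tailA_eq {N : List String} {L : String → String} (ns : List String) (hns : ∀ n ∈ ns, n ∈ N) :
    ∀ (p : PySem.Dict String String) (g : PySem.Dict String (PySem.Set String)),
    UFState N p L →
    (ns.foldl (fun (st : PySem.Dict String String × PySem.Dict String (PySem.Set String)) n =>
      ((ufFind (N.length + 1) st.1 n).1,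
        st.2.insert (ufFind (N.length + 1) st.1 n).2
          ((st.2.getD (ufFind (N.length + 1) st.1 n).2 PySem.Set.empty).add n))) (p, g)).2 =
    groupA L ns g := by
  induction ns with
  | nil => intro p g _; rfl
  | cons n ns ih =>
    intro p g hS
    obtain ⟨hInv, hroots⟩ := hS
    have hnN : n ∈ N := hns n List.mem_cons_self
    obtain ⟨hI, hR, hT⟩ := ufFind_spec' hInv hnN
    have hr : (ufFind (N.length + 1) p n).2 = L n :=
      rootsTo_unique hR (hroots n hnN)
    simp only [List.foldl_cons, groupA]
    rw [ih (fun m hm => hns m (List.mem_cons_of_mem n hm)) _ _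
      ⟨hI, fun z hz => (hT z (L z)).mp (hroots z hz)⟩]
    simp only [groupA, hr]

-- overwriting the (unique) key k in an items list is List.set at its position
theorem map_overwrite_eq_set {ν : Type} (l : List (String × ν)) (k : String) (v : ν) (i : Nat)
    (hnd : (l.map Prod.fst).Nodup) (hi : i < l.length) (hk : (l[i]).1 = k) :
    l.map (fun p => if p.1 == k then (k, v) else p) = l.set i (k, v) := by
  induction l generalizing i with
  | nil => simp at hi
  | cons x l ihl =>
    cases i with
    | zero =>
      have hk0 : x.1 = k := by simpa using hk
      simp only [List.map_cons, List.set_cons_zero]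
      rw [if_pos (by simp [hk0])]
      congr 1
      simp only [List.map_cons, List.nodup_cons] at hnd
      have hknotin : k ∉ l.map Prod.fst := by rw [← hk0]; exact hnd.1
      have hcong : ∀ p ∈ l, (if p.1 == k then (k, v) else p) = p := by
        intro p hp
        rw [if_neg]
        simp only [beq_iff_eq]
        exact fun e => hknotin (e ▸ List.mem_map_of_mem hp)
      rw [List.map_congr_left hcong, List.map_id']
    | succ j =>
      have hj : j < l.length := by simpa using hi
      have hjk : (l[j]'hj).1 = k := by simpa using hk
      simp only [List.map_cons, List.set_cons_succ]
      simp only [List.map_cons, List.nodup_cons] at hnd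
      have hxk : ¬ (x.1 == k) := by
        simp only [beq_iff_eq]
        intro e
        have hkin : k ∈ l.map Prod.fst := by
          rw [← hjk]; exact List.mem_map_of_mem (List.getElem_mem hj)
        rw [e] at hnd; exact hnd.1 hkin
      rw [if_neg hxk]
      congr 1
      exact ihl j hnd.2 hj hjk

theorem tailB_eq (L : String → String) (ns : List String) :
    ∀ (ix : PySem.Dict String Nat) (out : List (PySem.Set String))
      (g : PySem.Dict String (PySem.Set String)),
    (∀ k, ix.get? k = PySem.List.index? g.keys k) → out = g.values → g.keys.Nodup →
    (ns.foldl (fun (st : PySem.Dict String Nat × List (PySem.Set String)) n =>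
      match st.1.get? (L n) with
      | some i => (st.1, st.2.set i ((st.2.getD i PySem.Set.empty).add n))
      | none => (st.1.insert (L n) st.2.length, st.2 ++ [PySem.Set.ofList [n]])) (ix, out)).2 =
    (groupA L ns g).values := by
  induction ns with
  | nil => intro ix out g _ hout _; simpa [groupA] using hout
  | cons n ns ih =>
    intro ix out g hix hout hnd
    simp only [List.foldl_cons, groupA]
    have hlen : g.keys.length = g.values.length := by
      simp [PySem.Dict.keys, PySem.Dict.values]
    have hlen2 : g.keys.length = g.items.length := by simp [PySem.Dict.keys]
    by_cases hc : g.contains (L n) = true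
    · -- existing key: overwrite in place
      have hmem : L n ∈ g.keys := (PySem.Dict.contains_iff_mem_keys g (L n)).mp hc
      have hisome : (PySem.List.index? g.keys (L n)).isSome := by
        rw [PySem.List.index?_isSome_iff]; exact hmem
      obtain ⟨i, hidx⟩ := Option.isSome_iff_exists.mp hisome
      obtain ⟨hilt, hkey, _⟩ := PySem.List.getElem_of_index?_eq_some hidx
      have hii : i < g.items.length := by omega
      have hfst : (g.items[i]'hii).1 = L n := by
        have := hkey
        simpa [PySem.Dict.keys] using this
      have hget : ix.get? (L n) = some i := by rw [hix, hidx]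
      have heq : (L n, (g.items[i]'hii).2) = g.items[i]'hii := by
        rw [← hfst]
      have hgets : g.get? (L n) = some (g.items[i]'hii).2 :=
        PySem.Dict.get?_of_mem_items g (heq ▸ List.getElem_mem hii) hnd
      have hgetD : g.getD (L n) PySem.Set.empty = (g.items[i]'hii).2 := by
        rw [PySem.Dict.getD_eq_get?_getD, hgets]; rfl
      have hitems' : (g.insert (L n) ((g.getD (L n) PySem.Set.empty).add n)).items =
          g.items.set i (L n, ((g.items[i]'hii).2).add n) := by
        rw [PySem.Dict.items_insert_of_contains g _ hc, hgetD]
        exact map_overwrite_eq_set g.items (L n) _ i hnd hii hfst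
      have hkeys' : (g.insert (L n) ((g.getD (L n) PySem.Set.empty).add n)).keys = g.keys := by
        rw [PySem.Dict.keys, hitems', List.map_set]
        have : (g.items.map Prod.fst).set i (L n) = (g.items.map Prod.fst).set i ((g.items.map Prod.fst)[i]'(by simpa using hii)) := by
          congr 1
          simp [hfst]
        rw [this, List.set_getElem_self]
        rfl
      have hvalues' : (g.insert (L n) ((g.getD (L n) PySem.Set.empty).add n)).values =
          g.values.set i (((g.items[i]'hii).2).add n) := by
        rw [PySem.Dict.values, hitems', List.map_set]
        rfl
      have houtD : out.getD i PySem.Set.empty = (g.items[i]'hii).2 := by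
        rw [hout]
        rw [List.getD_eq_getElem g.values PySem.Set.empty (by omega)]
        simp [PySem.Dict.values]
      simp only [hget]
      rw [ih ix (out.set i ((out.getD i PySem.Set.empty).add n))
        (g.insert (L n) ((g.getD (L n) PySem.Set.empty).add n))
        (fun k => by rw [hix k, hkeys']) (by rw [houtD, hout, hvalues']) (by rw [hkeys']; exact hnd)]
      rfl
    · -- new key: append
      have hcf : g.contains (L n) = false := by
        cases hcc : g.contains (L n)
        · rfl
        · exact absurd hcc hc
      have hnotmem : L n ∉ g.keys := fun hm => hc ((PySem.Dict.contains_iff_mem_keys g (L n)).mpr hm)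
      have hidx : PySem.List.index? g.keys (L n) = none :=
        (PySem.List.index?_eq_none_iff g.keys (L n)).mpr hnotmem
      have hget : ix.get? (L n) = none := by rw [hix, hidx]
      have hgetD : g.getD (L n) PySem.Set.empty = PySem.Set.empty :=
        PySem.Dict.getD_of_not_contains g _ hcf
      have hitems' : (g.insert (L n) ((g.getD (L n) PySem.Set.empty).add n)).items =
          g.items ++ [(L n, PySem.Set.empty.add n)] := by
        rw [PySem.Dict.items_insert_of_not_contains g _ hcf, hgetD]
      have hkeys' : (g.insert (L n) ((g.getD (L n) PySem.Set.empty).add n)).keys =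
          g.keys ++ [L n] := by
        rw [PySem.Dict.keys, hitems']
        simp [PySem.Dict.keys]
      have hvalues' : (g.insert (L n) ((g.getD (L n) PySem.Set.empty).add n)).values =
          g.values ++ [PySem.Set.empty.add n] := by
        rw [PySem.Dict.values, hitems']
        simp [PySem.Dict.values]
      simp only [hget]
      have hof : PySem.Set.ofList [n] = PySem.Set.empty.add n := rfl
      have hix' : ∀ k, (ix.insert (L n) out.length).get? k =
          PySem.List.index? (g.insert (L n) ((g.getD (L n) PySem.Set.empty).add n)).keys k := by
        rw [hkeys']
        intro k
        rw [PySem.Dict.get?_insert ix (L n) k out.length]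
        by_cases hkn : k = L n
        · rw [if_pos hkn, hkn, PySem.List.index?_append_singleton_self g.keys (L n) hnotmem,
            hout, hlen]
        · rw [if_neg hkn, hix k]
          by_cases hkin : k ∈ g.keys
          · rw [PySem.List.index?_append_of_mem [L n] hkin]
          · rw [(PySem.List.index?_eq_none_iff g.keys k).mpr hkin,
              (PySem.List.index?_eq_none_iff _ k).mpr (by simp [hkin, hkn])]
      have hnd' : (g.insert (L n) ((g.getD (L n) PySem.Set.empty).add n)).keys.Nodup := by
        rw [hkeys']
        simp only [List.nodup_append, List.nodup_cons, List.not_mem_nil, not_false_iff,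
          List.nodup_nil, and_true, true_and]
        refine ⟨hnd, ?_⟩
        exact fun a ha e he hae => hnotmem (by simp at he; rw [← he, ← hae]; exact ha)
      rw [ih (ix.insert (L n) out.length) (out ++ [PySem.Set.ofList [n]])
        (g.insert (L n) ((g.getD (L n) PySem.Set.empty).add n))
        hix' (by rw [hof, hout, hvalues']) hnd']
      rfl

-- ---- specialisations of the flattening lemmas to the two ports' loop bodies ----
theorem foldl_edges_groupA' (g : List String) (fuel : Nat) (init : PySem.Dict String String) :
    (PySem.List.pyRange 1 (g.length : Int) 1).foldl
        (fun par i => ufUnion fuel par (PySem.List.pyGetD g 0 "") (PySem.List.pyGetD g i "")) init =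
      ((g.drop 1).map (fun m => (g.getD 0 "", m))).foldl
        (fun p e => ufUnion fuel p e.1 e.2) init :=
  foldl_edges_group g (fun p e => ufUnion fuel p e.1 e.2) init

theorem foldl_edges_groupB' (g : List String) (init : PySem.Dict String String) :
    (PySem.List.slice g (some 1) none).foldl
        (fun lab m => if lab.getD (PySem.List.pyGetD g 0 "") "" ≠ lab.getD m "" then
            relabelStep lab (lab.getD (PySem.List.pyGetD g 0 "") "") (lab.getD m "") else lab) init =
      ((g.drop 1).map (fun m => (g.getD 0 "", m))).foldl
        (fun lab e => if lab.getD e.1 "" ≠ lab.getD e.2 "" then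
            relabelStep lab (lab.getD e.1 "") (lab.getD e.2 "") else lab) init :=
  foldl_edges_groupB g (fun lab e => if lab.getD e.1 "" ≠ lab.getD e.2 "" then
            relabelStep lab (lab.getD e.1 "") (lab.getD e.2 "") else lab) init

theorem edgesOf_append (P Q : List (List String)) :
    edgesOf (P ++ Q) = edgesOf P ++ edgesOf Q := by
  simp [edgesOf]

-- ===== VERDICT (by name: the statement is the Claim_ definition above) =====
theorem partition_join_py_spec : Claim_equal_partition_join_py := by
  intro P Q names hDom hPre
  unfold Spec_partition_join_py
  have hpre0 : ∀ z, ((names.foldl (fun d n => d.insert n n) PySem.Dict.empty).get? z) =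
      if z ∈ names then some z else none := by
    intro z; rw [foldl_insert_get? names PySem.Dict.empty z]; rfl
  have hUF0 : UFState names (names.foldl (fun d n => d.insert n n) PySem.Dict.empty)
      (fun z => z) := by
    refine ⟨⟨fun z => ?_, fun z y hg => ?_, ⟨fun _ => 0, fun x y hs => ?_⟩⟩, fun z hz => ?_⟩
    · rw [hpre0 z]; by_cases hz : z ∈ names <;> simp [hz]
    · rw [hpre0 z] at hg
      by_cases hz : z ∈ names
      · rw [if_pos hz] at hg; cases Option.some.inj hg; exact hz
      · rw [if_neg hz] at hg; cases hg
    · obtain ⟨hg, hne⟩ := hs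
      rw [hpre0 x] at hg
      by_cases hx : x ∈ names
      · rw [if_pos hx] at hg; exact absurd (Option.some.inj hg).symm hne
      · rw [if_neg hx] at hg; cases hg
    · exact ⟨Relation.ReflTransGen.refl, by rw [IsRoot, hpre0 z, if_pos hz]⟩
  have hLab0 : LabState names (names.foldl (fun d n => d.insert n n) PySem.Dict.empty)
      (fun z => z) := by
    refine ⟨fun z => hpre0 z, foldl_insert_nodup names PySem.Dict.empty (by simp [PySem.Dict.empty, PySem.Dict.keys])⟩
  have hend : ∀ e ∈ edgesOf (P ++ Q), e.1 ∈ names ∧ e.2 ∈ names := by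
    intro e he
    rw [edgesOf, List.mem_flatMap] at he
    obtain ⟨g, hg, hm⟩ := he
    rw [List.mem_map] at hm
    obtain ⟨m, hmg, rfl⟩ := hm
    have hglen : 2 ≤ g.length := by
      have h1 : (g.drop 1).length > 0 := List.length_pos_of_mem hmg
      simp only [List.length_drop] at h1
      omega
    have hall := hPre g hg hglen
    constructor
    · refine hall _ ?_
      rw [List.getD_eq_getElem g "" (by omega)]
      exact List.getElem_mem _
    · exact hall m (List.mem_of_mem_drop hmg)
  have hUF := ufProcess_state (N := names) (edgesOf (P ++ Q)) hUF0 hend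
  have hLab := labProcess_state (N := names) (edgesOf (P ++ Q)) hLab0 hend
  simp only [partition_join_py, partition_join_py_alt, List.foldl_cons, List.foldl_nil,
    foldl_edges_groupA', foldl_edges_groupB']
  simp only [foldl_edges_parts, ← List.foldl_append, ← edgesOf_append]
  -- A side: the grouping tail over the union-find state
  rw [tailA_eq (N := names) (L := (edgesOf (P ++ Q)).foldl Lstep (fun z => z)) names
    (fun n hn => hn) _ PySem.Dict.empty hUF]
  -- B side: replace lab.getD n "" by the abstract label, then run the grouping tail
  have hgetL : ∀ n ∈ names,
      ((edgesOf (P ++ Q)).foldl (fun lab e =>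
        if lab.getD e.1 "" ≠ lab.getD e.2 "" then
          relabelStep lab (lab.getD e.1 "") (lab.getD e.2 "") else lab)
        (names.foldl (fun d n => d.insert n n) PySem.Dict.empty)).getD n "" =
      (edgesOf (P ++ Q)).foldl Lstep (fun z => z) n := by
    intro n hn
    rw [PySem.Dict.getD_eq_get?_getD, hLab.1 n, if_pos hn]
    rfl
  rw [PySem.List.foldl_congr_mem names _
    (fun (st : PySem.Dict String Nat × List (PySem.Set String)) n =>
      match st.1.get? ((edgesOf (P ++ Q)).foldl Lstep (fun z => z) n) with
      | some i => (st.1, st.2.set i ((st.2.getD i PySem.Set.empty).add n))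
      | none => (st.1.insert ((edgesOf (P ++ Q)).foldl Lstep (fun z => z) n) st.2.length,
          st.2 ++ [PySem.Set.ofList [n]]))
    (PySem.Dict.empty, ([] : List (PySem.Set String)))
    (fun acc x hx => by rw [hgetL x hx])]
  rw [tailB_eq ((edgesOf (P ++ Q)).foldl Lstep (fun z => z)) names PySem.Dict.empty []
    PySem.Dict.empty (fun k => rfl) rfl (by simp [PySem.Dict.empty, PySem.Dict.keys])]
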